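-- pv_equiv track=rewrite | github.com/dysnpv/CS180_HW4 | CS180_HW4.py | Q2_solution
-- ===== SOURCE A (Python) =====
-- infty = 2**20
--
-- def Q2_solution(n, K, x):
--     cost = [[infty for i in range(n + 1)] for j in range(n + 1)]
--     L = [[infty for i in range(K + 1)] for j in range(n + 1)]
--     for p in range(1, n):
--         c = p
--         cost[p][p + 1] = 0
--         for i in range(p + 2, n + 1):
--             cost[p][i] = cost[p][i - 1] + (i - 1 - c) * (x[i] - x[i - 1])
--             while(c + 1 < i and abs(x[p] - x[c + 1]) <= abs(x[i] - x[c + 1])):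
--                 c += 1
--                 cost[p][i] -= abs(x[i] - x[c]) - abs(x[p] - x[c])
--     for i in range(1, n + 1):
--         s = 0
--         for j in range(1, i):
--             s += abs(x[i] - x[j])
--         L[i][1] = s
--         for j in range(1, K + 1):
--             for p in range(j - 1, i):
--                 if L[i][j] > L[p][j - 1] + cost[p][i]:
--                     L[i][j] = L[p][j - 1] + cost[p][i]
--     min_L = infty
--     for i in range(1, n + 1):
--         s = 0
--         for j in range(i + 1, n + 1):
--             s += abs(x[i] - x[j])
--         if min_L > L[i][K] + s:
--             min_L = L[i][K] + s
--     return min_L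
-- ===== SOURCE B (Python) =====
-- infty = 2**20
--
-- def Q2_solution(n, K, x):
--     if n <= 0 or K > n:
--         return infty
--     # boundary cost(p, i), computed on demand and cached per left endpoint p:
--     # rows[p][i - p - 1] = (split pointer c, cost value) at right endpoint i
--     rows = {}
--     def cost(p, i):
--         if not (1 <= p < i <= n):
--             return infty
--         row = rows.setdefault(p, [(p, 0)])      # state at i = p + 1
--         while len(row) < i - p:
--             c, v = row[-1]
--             m = p + 1 + len(row)                # the right endpoint being added
--             v += (m - 1 - c) * (x[m] - x[m - 1])
--             while c + 1 < m and abs(x[p] - x[c + 1]) <= abs(x[m] - x[c + 1]):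
--                 c += 1
--                 v -= abs(x[m] - x[c]) - abs(x[p] - x[c])
--             row.append((c, v))
--         return row[i - p - 1][1]
--     # top-down memoized DP: L(i, j) = best cost of the first j clusters ending at i
--     memo = {}
--     def L(i, j):
--         if j <= 0 or not (1 <= i <= n):
--             return infty
--         if (i, j) in memo:
--             return memo[(i, j)]
--         best = sum(abs(x[i] - x[t]) for t in range(1, i)) if j == 1 else infty
--         for p in range(j - 1, i):
--             best = min(best, L(p, j - 1) + cost(p, i))
--         memo[(i, j)] = best
--         return best
--     return min([infty] + [L(i, K) + sum(abs(x[i] - x[t]) for t in range(i + 1, n + 1))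
--                           for i in range(1, n + 1)])
-- ===== Notes on version B (the rewrite author's own statement) =====
-- stated objective: alternative
-- what changed: B replaces A's bottom-up table filling by top-down memoized recursion: the DP value L(i,j) is a recursive function with a memo dict (A fills an (n+1)x(K+1) table row by row with strict-compare updates), the boundary cost is a demand-driven per-endpoint cached row extended lazily only when the DP asks for it (A eagerly fills a full (n+1)^2 cost matrix first), and the answer is a direct min over a comprehension; the history-dependent split-pointer step itself is kept because A's exact values on unsorted input depend on it.
import Mathlib
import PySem

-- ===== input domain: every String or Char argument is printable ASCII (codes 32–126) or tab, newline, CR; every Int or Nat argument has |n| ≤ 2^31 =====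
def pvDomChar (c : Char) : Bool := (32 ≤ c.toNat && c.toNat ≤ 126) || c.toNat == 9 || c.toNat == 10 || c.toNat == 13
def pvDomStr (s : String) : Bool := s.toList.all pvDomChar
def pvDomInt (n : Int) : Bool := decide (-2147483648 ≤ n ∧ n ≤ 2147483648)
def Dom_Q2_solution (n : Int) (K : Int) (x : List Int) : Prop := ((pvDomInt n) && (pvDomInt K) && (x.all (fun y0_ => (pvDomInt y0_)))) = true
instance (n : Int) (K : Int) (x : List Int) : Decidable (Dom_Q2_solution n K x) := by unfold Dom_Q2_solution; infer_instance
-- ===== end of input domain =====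

-- B restructures A's K-median DP as top-down memoized recursion (a recursive L(i,j) with a
-- memo instead of A's bottom-up row-by-row table, a demand-driven cached cost row instead of
-- A's eagerly filled cost matrix, a direct min over a comprehension instead of A's
-- strict-compare accumulator); same asymptotic cost (objective: alternative);
-- equal return values proved below.

-- ===== PORT A =====
-- Python's 2-D list tables are ported as Int → Int → Int update functions; exact because under
-- Pre_ every index Python reads or writes is inside the allocated ranges (no IndexError).
def pvInfty : Int := 2 ^ 20

-- A's inner while loop: state (c, cost[p][i]); the '-=' on the just-written cell cost[p][i]
-- is kept as the running value v.
def Q2AWhile (g : Int → Int) (p i c v : Int) : Int × Int :=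
  if _h : c + 1 < i ∧ |g p - g (c + 1)| ≤ |g i - g (c + 1)| then
    Q2AWhile g p i (c + 1) (v - (|g i - g (c + 1)| - |g p - g (c + 1)|))
  else (c, v)
termination_by (i - c).toNat
decreasing_by omega

-- body of A's 'for i in range(p + 2, n + 1)' loop (state: cost table, c)
def Q2ACostInner (g : Int → Int) (p : Int) (st : (Int → Int → Int) × Int) (i : Int) :
    (Int → Int → Int) × Int :=
  let r := Q2AWhile g p i st.2 (st.1 p (i - 1) + (i - 1 - st.2) * (g i - g (i - 1)))
  (fun a b => if a = p ∧ b = i then r.2 else st.1 a b, r.1)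

-- body of A's 'for p in range(1, n)' loop: cost[p][p+1] = 0, c = p, then the i loop
def Q2ACostOuter (g : Int → Int) (n : Int) (cost : Int → Int → Int) (p : Int) :
    Int → Int → Int :=
  ((PySem.List.pyRange (p + 2) (n + 1) 1).foldl (Q2ACostInner g p)
    (fun a b => if a = p ∧ b = p + 1 then 0 else cost a b, p)).1

-- A's first loop nest: the cost table
def Q2ACost (g : Int → Int) (n : Int) : Int → Int → Int :=
  (PySem.List.pyRange 1 n 1).foldl (Q2ACostOuter g n) (fun _ _ => pvInfty)

-- body of A's 'for p in range(j - 1, i)' loop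
def Q2ALp (cost : Int → Int → Int) (i j : Int) (L : Int → Int → Int) (p : Int) :
    Int → Int → Int :=
  if L i j > L p (j - 1) + cost p i then
    (fun a b => if a = i ∧ b = j then L p (j - 1) + cost p i else L a b)
  else L

-- body of A's 'for j in range(1, K + 1)' loop
def Q2ALj (cost : Int → Int → Int) (i : Int) (L : Int → Int → Int) (j : Int) :
    Int → Int → Int :=
  (PySem.List.pyRange (j - 1) i 1).foldl (Q2ALp cost i j) L

-- body of A's 'for i in range(1, n + 1)' loop: s, L[i][1] = s, then the j loop
def Q2ALrow (g : Int → Int) (cost : Int → Int → Int) (K : Int) (L : Int → Int → Int)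
    (i : Int) : Int → Int → Int :=
  let s := (PySem.List.pyRange 1 i 1).foldl (fun s j => s + |g i - g j|) 0
  (PySem.List.pyRange 1 (K + 1) 1).foldl (Q2ALj cost i)
    (fun a b => if a = i ∧ b = 1 then s else L a b)

-- A's second loop nest: the L table
def Q2AL (g : Int → Int) (cost : Int → Int → Int) (n K : Int) : Int → Int → Int :=
  (PySem.List.pyRange 1 (n + 1) 1).foldl (Q2ALrow g cost K) (fun _ _ => pvInfty)

-- body of A's final 'for i in range(1, n + 1)' loop: suffix sum s, then the strict-min update
def Q2AMin (g : Int → Int) (L : Int → Int → Int) (n K : Int) (m i : Int) : Int :=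
  let s := (PySem.List.pyRange (i + 1) (n + 1) 1).foldl (fun s j => s + |g i - g j|) 0
  if m > L i K + s then L i K + s else m

def Q2_solution (n : Int) (K : Int) (x : List Int) : Int :=
  let g := fun i => PySem.List.pyGetD x i 0
  let cost := Q2ACost g n
  let L := Q2AL g cost n K
  (PySem.List.pyRange 1 (n + 1) 1).foldl (Q2AMin g L n K) pvInfty

-- ===== PORT B =====
-- B's inner while loop on the cached row state (c, v) (same Python while statement as A's;
-- B keeps it because A's exact values on unsorted input depend on this history-dependent scan)
def Q2BWhile (g : Int → Int) (p i c v : Int) : Int × Int :=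
  if _h : c + 1 < i ∧ |g p - g (c + 1)| ≤ |g i - g (c + 1)| then
    Q2BWhile g p i (c + 1) (v - (|g i - g (c + 1)| - |g p - g (c + 1)|))
  else (c, v)
termination_by (i - c).toNat
decreasing_by omega

-- B's demand-driven cached row rows[p]: the state (c, v) at right endpoint i; each lazy
-- extension step appends exactly this recurrence, so the cached entry is this recursion on i
def Q2BState (g : Int → Int) (p i : Int) : Int × Int :=
  if _h : i ≤ p + 1 then (p, 0)
  else
    let s := Q2BState g p (i - 1)
    Q2BWhile g p i s.1 (s.2 + (i - 1 - s.1) * (g i - g (i - 1)))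
termination_by (i - p).toNat
decreasing_by omega

-- B's cost(p, i): guard, then the cached row value
def Q2BCost (g : Int → Int) (n p i : Int) : Int :=
  if 1 ≤ p ∧ p < i ∧ i ≤ n then (Q2BState g p i).2 else pvInfty

-- sum(abs(x[i] - x[t]) for t in range(1, i))
def Q2BS (g : Int → Int) (i : Int) : Int :=
  ((PySem.List.pyRange 1 i 1).map (fun t => |g i - g t|)).sum

-- B's memoized recursion L(i, j) (the memo does not change values; ported as the recursion)
def Q2BL (g : Int → Int) (n i j : Int) : Int :=
  if _h : j ≤ 0 ∨ ¬(1 ≤ i ∧ i ≤ n) then pvInfty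
  else
    (PySem.List.pyRange (j - 1) i 1).foldl
      (fun best p => min best (Q2BL g n p (j - 1) + Q2BCost g n p i))
      (if j = 1 then Q2BS g i else pvInfty)
termination_by j.toNat
decreasing_by omega

-- sum(abs(x[i] - x[t]) for t in range(i + 1, n + 1))
def Q2BSuf (g : Int → Int) (n i : Int) : Int :=
  ((PySem.List.pyRange (i + 1) (n + 1) 1).map (fun t => |g i - g t|)).sum

def Q2_solution_alt (n : Int) (K : Int) (x : List Int) : Int :=
  if n ≤ 0 ∨ K > n then pvInfty
  else
    let g := fun i => PySem.List.pyGetD x i 0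
    ((PySem.List.pyRange 1 (n + 1) 1).map (fun i => Q2BL g n i K + Q2BSuf g n i)).foldl
      min pvInfty

-- ===== PRECONDITION & SPEC =====
-- Pre_ excludes exactly the inputs where A raises IndexError: for n ≥ 2 it reads x[1..n]
-- (needs n < len x) and writes column 1 of L (needs K ≥ 1); for n = 1 only K ≥ 1 is needed
-- (x is never indexed); for n ≤ 0 every loop body is empty and A returns infty.
def Pre_Q2_solution (n : Int) (K : Int) (x : List Int) : Prop :=
  n ≤ 0 ∨ (1 ≤ K ∧ (n = 1 ∨ n < (x.length : Int)))
instance (n : Int) (K : Int) (x : List Int) : Decidable (Pre_Q2_solution n K x) := by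
  unfold Pre_Q2_solution; infer_instance

def pvWitness_Q2_solution : Int × Int × List Int := (3, 2, [0, 1, 5, 9])

def Spec_Q2_solution (n : Int) (K : Int) (x : List Int) (out : Int) : Prop := out = Q2_solution_alt n K x
instance (n : Int) (K : Int) (x : List Int) (out : Int) : Decidable (Spec_Q2_solution n K x out) := by
  unfold Spec_Q2_solution; infer_instance

-- ===== CLAIM (what is proved, stated in full; the proofs are below) =====
def Claim_equal_Q2_solution : Prop := ∀ (n : Int) (K : Int) (x : List Int), Dom_Q2_solution n K x → Pre_Q2_solution n K x → Spec_Q2_solution n K x (Q2_solution n K x)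

-- ===== LEMMAS AND PROOFS =====

-- the common DP recurrence, by layers
def Q2Lspec (g : Int → Int) (cost : Int → Int → Int) (n : Int) : Nat → Int → Int
  | 0, _ => pvInfty
  | j + 1, i =>
    if 1 ≤ i ∧ i ≤ n then
      ((PySem.List.pyRange (j : Int) i 1).map
        (fun p => Q2Lspec g cost n j p + cost p i)).foldl
        min (if j = 0 then Q2BS g i else pvInfty)
    else pvInfty

lemma q2_if_gt_min (v w : Int) : (if v > w then w else v) = min v w := by
  rw [min_def]; split_ifs <;> omega

lemma q2_foldl_gt_min (h : Int → Int) (l : List Int) (v : Int) :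
    l.foldl (fun m i => if m > h i then h i else m) v = (l.map h).foldl min v := by
  induction l generalizing v with
  | nil => rfl
  | cons a t ih =>
    rw [List.foldl_cons, List.map_cons, List.foldl_cons, q2_if_gt_min]; exact ih _

lemma q2_foldl_min_ge (l : List Int) (v : Int) (hv : ∀ i ∈ l, v ≤ i) :
    l.foldl min v = v := by
  induction l with
  | nil => rfl
  | cons a t ih =>
    simp only [List.foldl_cons]
    rw [min_eq_left (hv a (by simp))]
    exact ih (fun i hi => hv i (by simp [hi]))

-- the two while loops are the same function
lemma q2while_eq (g : Int → Int) (p i : Int) :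
    ∀ (m : Nat) (c v : Int), (i - c).toNat ≤ m → Q2AWhile g p i c v = Q2BWhile g p i c v := by
  intro m
  induction m with
  | zero =>
    intro c v hm
    rw [Q2AWhile, Q2BWhile, dif_neg (by omega), dif_neg (by omega)]
  | succ m ih =>
    intro c v hm
    by_cases hg : c + 1 < i ∧ |g p - g (c + 1)| ≤ |g i - g (c + 1)|
    · rw [Q2AWhile, Q2BWhile, dif_pos hg, dif_pos hg]
      exact ih _ _ (by omega)
    · rw [Q2AWhile, Q2BWhile, dif_neg hg, dif_neg hg]

lemma q2while_eq' (g : Int → Int) (p i c v : Int) :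
    Q2AWhile g p i c v = Q2BWhile g p i c v :=
  q2while_eq g p i (i - c).toNat c v (le_refl _)

lemma q2BState_base (g : Int → Int) (p i : Int) (h : i ≤ p + 1) :
    Q2BState g p i = (p, 0) := by
  rw [Q2BState, dif_pos h]

lemma q2BState_step (g : Int → Int) (p i : Int) (h : p + 1 < i) :
    Q2BState g p i = Q2BWhile g p i (Q2BState g p (i - 1)).1
      ((Q2BState g p (i - 1)).2 + (i - 1 - (Q2BState g p (i - 1)).1) * (g i - g (i - 1))) := by
  rw [Q2BState, dif_neg (by omega)]

-- A's inner i loop writes exactly the Q2BState values into row p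
lemma q2cost_inner (g : Int → Int) (n p : Int) :
    ∀ (m : Nat) (a : Int) (costf : Int → Int → Int) (c : Int),
      (n + 1 - a).toNat ≤ m → p + 2 ≤ a →
      c = (Q2BState g p (a - 1)).1 →
      costf p (a - 1) = (Q2BState g p (a - 1)).2 →
      ∀ u v, ((PySem.List.pyRange a (n + 1) 1).foldl (Q2ACostInner g p) (costf, c)).1 u v
        = if u = p ∧ a ≤ v ∧ v ≤ n then (Q2BState g p v).2 else costf u v := by
  intro m
  induction m with
  | zero =>
    intro a costf c hm ha hc hcost u v
    rw [PySem.List.pyRange_one_eq_nil (by omega), List.foldl_nil,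
      if_neg (by rintro ⟨_, h1, h2⟩; omega)]
  | succ m ih =>
    intro a costf c hm ha hc hcost u v
    by_cases hend : n + 1 ≤ a
    · rw [PySem.List.pyRange_one_eq_nil (by omega), List.foldl_nil,
        if_neg (by rintro ⟨_, h1, h2⟩; omega)]
    · rw [PySem.List.pyRange_one_cons (by omega : a < n + 1)]
      simp only [List.foldl_cons]
      have hr : Q2AWhile g p a c (costf p (a - 1) + (a - 1 - c) * (g a - g (a - 1)))
          = Q2BState g p a := by
        rw [q2while_eq', hc, hcost, q2BState_step g p a (by omega)]
      simp only [Q2ACostInner]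
      rw [hr]
      rw [ih (a + 1) _ _ (by omega) (by omega)
        (by rw [show a + 1 - 1 = a from by ring])
        (by rw [show a + 1 - 1 = a from by ring]; simp) u v]
      by_cases h1 : u = p ∧ a + 1 ≤ v ∧ v ≤ n
      · rw [if_pos h1, if_pos ⟨h1.1, by omega, h1.2.2⟩]
      · rw [if_neg h1]
        by_cases h2 : u = p ∧ v = a
        · rw [if_pos h2, if_pos ⟨h2.1, by omega, by omega⟩, h2.2]
        · have hng : ¬(u = p ∧ a ≤ v ∧ v ≤ n) := by
            rintro ⟨hu, hv1, hv2⟩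
            by_cases hva : v = a
            · exact h2 ⟨hu, hva⟩
            · exact h1 ⟨hu, by omega, hv2⟩
          rw [if_neg h2, if_neg hng]

-- A's outer p loop: the finished table holds the Q2BState values
lemma q2cost_rows (g : Int → Int) (n : Int) :
    ∀ (m : Nat) (r : Int) (cost0 : Int → Int → Int), 1 ≤ r → (n - r).toNat ≤ m →
      (∀ u v, cost0 u v = if 1 ≤ u ∧ u < r ∧ u < v ∧ v ≤ n then (Q2BState g u v).2
                          else pvInfty) →
      ∀ u v, ((PySem.List.pyRange r n 1).foldl (Q2ACostOuter g n) cost0) u v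
        = if 1 ≤ u ∧ u < n ∧ u < v ∧ v ≤ n then (Q2BState g u v).2 else pvInfty := by
  intro m
  induction m with
  | zero =>
    intro r cost0 hr hm h0 u v
    rw [PySem.List.pyRange_one_eq_nil (by omega), List.foldl_nil, h0 u v]
    exact if_congr ⟨fun ⟨a, b, c, d⟩ => ⟨a, by omega, c, d⟩,
      fun ⟨a, b, c, d⟩ => ⟨a, by omega, c, d⟩⟩ rfl rfl
  | succ m ih =>
    intro r cost0 hr hm h0 u v
    by_cases hend : n ≤ r
    · rw [PySem.List.pyRange_one_eq_nil (by omega), List.foldl_nil, h0 u v]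
      exact if_congr ⟨fun ⟨a, b, c, d⟩ => ⟨a, by omega, c, d⟩,
        fun ⟨a, b, c, d⟩ => ⟨a, by omega, c, d⟩⟩ rfl rfl
    · rw [PySem.List.pyRange_one_cons (by omega : r < n)]
      simp only [List.foldl_cons]
      refine ih (r + 1) _ (by omega) (by omega) ?_ u v
      intro u' v'
      unfold Q2ACostOuter
      rw [q2cost_inner g n r (n + 1 - (r + 2)).toNat (r + 2) _ r (le_refl _) (le_refl _)
        (by rw [show r + 2 - 1 = r + 1 from by ring, q2BState_base g r (r + 1) (le_refl _)])
        (by rw [show r + 2 - 1 = r + 1 from by ring, q2BState_base g r (r + 1) (le_refl _)]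
            simp) u' v']
      by_cases h1 : u' = r ∧ r + 2 ≤ v' ∧ v' ≤ n
      · rw [if_pos h1, if_pos ⟨by omega, by omega, by omega, h1.2.2⟩, h1.1]
      · rw [if_neg h1]
        by_cases h2 : u' = r ∧ v' = r + 1
        · rw [if_pos h2, if_pos ⟨by omega, by omega, by omega, by omega⟩, h2.1, h2.2,
            q2BState_base g r (r + 1) (le_refl _)]
        · rw [if_neg h2, h0 u' v']
          refine if_congr ⟨fun ⟨a, b, c, d⟩ => ⟨a, by omega, c, d⟩, fun ⟨a, b, c, d⟩ => ?_⟩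
            rfl rfl
          refine ⟨a, by_contra fun hlt => ?_, c, d⟩
          have hur : u' = r := by omega
          by_cases hva : v' = r + 1
          · exact h2 ⟨hur, hva⟩
          · exact h1 ⟨hur, by omega, d⟩

lemma q2cost_eq (g : Int → Int) (n : Int) :
    ∀ u v, Q2ACost g n u v = Q2BCost g n u v := by
  intro u v
  unfold Q2ACost Q2BCost
  rw [q2cost_rows g n (n - 1).toNat 1 _ (le_refl _) (by omega)
    (fun u' v' => by rw [if_neg (by rintro ⟨a, b, _⟩; omega)]) u v]
  exact if_congr ⟨fun ⟨a, b, c, d⟩ => ⟨a, c, d⟩, fun ⟨a, c, d⟩ => ⟨a, by omega, c, d⟩⟩ rfl rfl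

lemma q2AMin_funeq (g : Int → Int) (L : Int → Int → Int) (n K : Int) :
    Q2AMin g L n K = fun m i =>
      if m > L i K + Q2BSuf g n i then L i K + Q2BSuf g n i else m := by
  funext m i
  unfold Q2AMin Q2BSuf
  rw [PySem.List.foldl_add, zero_add]

lemma q2_suf_nonneg (g : Int → Int) (n i : Int) : 0 ≤ Q2BSuf g n i := by
  unfold Q2BSuf
  exact List.sum_nonneg (by intro y hy; obtain ⟨j, _, rfl⟩ := List.mem_map.1 hy; exact abs_nonneg _)

-- scalarization of A's p loop: it is a running min at cell (i, j)
lemma q2_pfold_char (cost : Int → Int → Int) (i j : Int) (l : List Int) :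
    ∀ (T : Int → Int → Int) (u v : Int),
      (l.foldl (Q2ALp cost i j) T) u v
        = if u = i ∧ v = j then
            (l.map (fun p => T p (j - 1) + cost p i)).foldl min (T i j)
          else T u v := by
  induction l with
  | nil =>
    intro T u v
    simp only [List.foldl_nil, List.map_nil]
    by_cases h : u = i ∧ v = j
    · rw [if_pos h, h.1, h.2]
    · rw [if_neg h]
  | cons p tl ih =>
    intro T u v
    simp only [List.foldl_cons, List.map_cons]
    rw [show Q2ALp cost i j T p
        = if T i j > T p (j - 1) + cost p i then
            (fun a b => if a = i ∧ b = j then T p (j - 1) + cost p i else T a b)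
          else T from rfl]
    by_cases hc : T i j > T p (j - 1) + cost p i
    · rw [if_pos hc, ih]
      have hmap : tl.map (fun q =>
            (if q = i ∧ j - 1 = j then T p (j - 1) + cost p i else T q (j - 1)) + cost q i)
          = tl.map (fun q => T q (j - 1) + cost q i) :=
        List.map_congr_left (fun q _ => by simp)
      by_cases h : u = i ∧ v = j
      · rw [if_pos h, if_pos h, hmap,
          if_pos (⟨rfl, rfl⟩ : i = i ∧ j = j), min_eq_right (le_of_lt hc)]
      · rw [if_neg h, if_neg h]
        simp [h]
    · rw [if_neg hc, ih]
      by_cases h : u = i ∧ v = j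
      · rw [if_pos h, if_pos h, min_eq_left (by omega : T i j ≤ T p (j - 1) + cost p i)]
      · rw [if_neg h, if_neg h]

-- A's j loop from layer t on, given rows < i and row-i layers < t already characterized
lemma q2_rowtail (g : Int → Int) (cost : Int → Int → Int) (n K i : Int)
    (hi1 : 1 ≤ i) (hin : i ≤ n) (T : Int → Int → Int)
    (hT : ∀ u v, T u v = if 1 ≤ u ∧ u < i ∧ 1 ≤ v ∧ v ≤ K then Q2Lspec g cost n v.toNat u
                         else pvInfty) :
    ∀ (m : Nat) (t : Int) (Tc : Int → Int → Int), 2 ≤ t → t ≤ K + 1 → (K + 1 - t).toNat ≤ m →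
      (∀ u v, Tc u v = if u = i ∧ 1 ≤ v ∧ v < t then Q2Lspec g cost n v.toNat u else T u v) →
      ∀ u v, ((PySem.List.pyRange t (K + 1) 1).foldl (Q2ALj cost i) Tc) u v
        = if u = i ∧ 1 ≤ v ∧ v ≤ K then Q2Lspec g cost n v.toNat u else T u v := by
  intro m
  induction m with
  | zero =>
    intro t Tc h2 h3 hm hTc u v
    have hiff : (u = i ∧ 1 ≤ v ∧ v < t) ↔ (u = i ∧ 1 ≤ v ∧ v ≤ K) := by
      constructor <;> (rintro ⟨a, b, c⟩; exact ⟨a, b, by omega⟩)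
    rw [PySem.List.pyRange_one_eq_nil (by omega), List.foldl_nil, hTc u v,
      if_congr hiff rfl rfl]
  | succ m ih =>
    intro t Tc h2 h3 hm hTc u v
    by_cases hend : K + 1 ≤ t
    · have hiff : (u = i ∧ 1 ≤ v ∧ v < t) ↔ (u = i ∧ 1 ≤ v ∧ v ≤ K) := by
        constructor <;> (rintro ⟨a, b, c⟩; exact ⟨a, b, by omega⟩)
      rw [PySem.List.pyRange_one_eq_nil (by omega), List.foldl_nil, hTc u v,
        if_congr hiff rfl rfl]
    · rw [PySem.List.pyRange_one_cons (by omega : t < K + 1)]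
      simp only [List.foldl_cons]
      refine ih (t + 1) _ (by omega) (by omega) (by omega) ?_ u v
      intro u' v'
      rw [show Q2ALj cost i Tc t
          = (PySem.List.pyRange (t - 1) i 1).foldl (Q2ALp cost i t) Tc from rfl,
        q2_pfold_char]
      by_cases h : u' = i ∧ v' = t
      · rw [if_pos h, if_pos (show u' = i ∧ 1 ≤ v' ∧ v' < t + 1 from ⟨h.1, by omega, by omega⟩)]
        rw [h.1, h.2]
        -- the freshly computed cell equals layer t of the spec
        obtain ⟨j', hj'⟩ : ∃ j', t.toNat = j' + 1 := ⟨(t - 1).toNat, by omega⟩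
        rw [hj']
        simp only [Q2Lspec]
        rw [if_pos ⟨hi1, hin⟩, if_neg (by omega : ¬(j' = 0))]
        have hci : Tc i t = pvInfty := by
          rw [hTc i t, if_neg (by rintro ⟨_, _, hx⟩; omega), hT i t,
            if_neg (by rintro ⟨_, hx, _⟩; omega)]
        rw [hci]
        have hcast : ((j' : Nat) : Int) = t - 1 := by omega
        rw [hcast]
        congr 1
        refine List.map_congr_left (fun p hp => ?_)
        have ⟨hp1, hp2⟩ := PySem.List.mem_pyRange_one.1 hp
        rw [hTc p (t - 1), if_neg (by rintro ⟨hx, _, _⟩; omega), hT p (t - 1),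
          if_pos ⟨by omega, by omega, by omega, by omega⟩,
          show (t - 1).toNat = j' from by omega]
      · rw [if_neg h, hTc u' v']
        by_cases h2' : u' = i ∧ 1 ≤ v' ∧ v' < t
        · rw [if_pos h2', if_pos ⟨h2'.1, h2'.2.1, by omega⟩]
        · rw [if_neg h2', if_neg (by
            rintro ⟨hxu, hx1, hx2⟩
            by_cases hvt : v' = t
            · exact h ⟨hxu, hvt⟩
            · exact h2' ⟨hxu, hx1, by omega⟩)]

-- A's whole row i: writes exactly the layer values of row i
lemma q2_row (g : Int → Int) (cost : Int → Int → Int) (n K i : Int) (hK : 1 ≤ K)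
    (hi1 : 1 ≤ i) (hin : i ≤ n) (T : Int → Int → Int)
    (hT : ∀ u v, T u v = if 1 ≤ u ∧ u < i ∧ 1 ≤ v ∧ v ≤ K then Q2Lspec g cost n v.toNat u
                         else pvInfty) :
    ∀ u v, Q2ALrow g cost K T i u v
      = if u = i ∧ 1 ≤ v ∧ v ≤ K then Q2Lspec g cost n v.toNat u else T u v := by
  intro u v
  show ((PySem.List.pyRange 1 (K + 1) 1).foldl (Q2ALj cost i)
      (fun a b => if a = i ∧ b = 1 then
          (PySem.List.pyRange 1 i 1).foldl (fun s j => s + |g i - g j|) 0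
        else T a b)) u v = _
  have hS : (PySem.List.pyRange 1 i 1).foldl (fun s j => s + |g i - g j|) 0 = Q2BS g i := by
    rw [PySem.List.foldl_add, zero_add]; rfl
  rw [hS, PySem.List.pyRange_one_cons (by omega : (1 : Int) < K + 1)]
  simp only [List.foldl_cons]
  refine q2_rowtail g cost n K i hi1 hin T hT (K + 1 - 2).toNat 2 _ (le_refl _) (by omega)
    (le_refl _) ?_ u v
  intro u' v'
  rw [show Q2ALj cost i (fun a b => if a = i ∧ b = 1 then Q2BS g i else T a b) 1
      = (PySem.List.pyRange (1 - 1) i 1).foldl (Q2ALp cost i 1)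
          (fun a b => if a = i ∧ b = 1 then Q2BS g i else T a b) from rfl,
    q2_pfold_char]
  by_cases h : u' = i ∧ v' = 1
  · rw [if_pos h, if_pos (show u' = i ∧ 1 ≤ v' ∧ v' < 2 from ⟨h.1, by omega, by omega⟩)]
    rw [h.1, h.2]
    rw [show ((1 : Int)).toNat = 0 + 1 from rfl]
    simp only [Q2Lspec]
    simp only [if_true, Nat.cast_zero, show (1 : Int) - 1 = 0 from rfl]
    rw [if_pos (⟨hi1, hin⟩ : 1 ≤ i ∧ i ≤ n)]
    congr 1
    refine List.map_congr_left (fun p hp => ?_)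
    rw [if_neg (show ¬(p = i ∧ (0 : Int) = 1) from by rintro ⟨_, hx⟩; omega), hT p 0,
      if_neg (show ¬(1 ≤ p ∧ p < i ∧ (1 : Int) ≤ 0 ∧ 0 ≤ K) from by rintro ⟨_, _, hx, _⟩; omega)]
  · rw [if_neg h]
    by_cases h2 : u' = i ∧ v' = 1
    · exact absurd h2 h
    · rw [if_neg h2, if_neg (by rintro ⟨hxu, hx1, hx2⟩; exact h ⟨hxu, by omega⟩)]

lemma q2AL_rows (g : Int → Int) (cost : Int → Int → Int) (n K : Int) (hK : 1 ≤ K) :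
    ∀ (m : Nat) (r : Int) (Tc : Int → Int → Int), 1 ≤ r → r ≤ n + 1 → (n + 1 - r).toNat ≤ m →
      (∀ u v, Tc u v = if 1 ≤ u ∧ u < r ∧ 1 ≤ v ∧ v ≤ K then Q2Lspec g cost n v.toNat u
                       else pvInfty) →
      ∀ u v, ((PySem.List.pyRange r (n + 1) 1).foldl (Q2ALrow g cost K) Tc) u v
        = if 1 ≤ u ∧ u ≤ n ∧ 1 ≤ v ∧ v ≤ K then Q2Lspec g cost n v.toNat u else pvInfty := by
  intro m
  induction m with
  | zero =>
    intro r Tc h1 h2 hm hTc u v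
    have hiff : (1 ≤ u ∧ u < r ∧ 1 ≤ v ∧ v ≤ K) ↔ (1 ≤ u ∧ u ≤ n ∧ 1 ≤ v ∧ v ≤ K) := by
      constructor <;> (rintro ⟨a, b, c, d⟩; exact ⟨a, by omega, c, d⟩)
    rw [PySem.List.pyRange_one_eq_nil (by omega), List.foldl_nil, hTc u v,
      if_congr hiff rfl rfl]
  | succ m ih =>
    intro r Tc h1 h2 hm hTc u v
    by_cases hend : n + 1 ≤ r
    · have hiff : (1 ≤ u ∧ u < r ∧ 1 ≤ v ∧ v ≤ K) ↔ (1 ≤ u ∧ u ≤ n ∧ 1 ≤ v ∧ v ≤ K) := by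
        constructor <;> (rintro ⟨a, b, c, d⟩; exact ⟨a, by omega, c, d⟩)
      rw [PySem.List.pyRange_one_eq_nil (by omega), List.foldl_nil, hTc u v,
        if_congr hiff rfl rfl]
    · rw [PySem.List.pyRange_one_cons (by omega : r < n + 1)]
      simp only [List.foldl_cons]
      refine ih (r + 1) _ (by omega) (by omega) (by omega) ?_ u v
      intro u' v'
      rw [q2_row g cost n K r hK h1 (by omega) Tc hTc u' v']
      by_cases h : u' = r ∧ 1 ≤ v' ∧ v' ≤ K
      · rw [if_pos h, if_pos ⟨by omega, by omega, h.2.1, h.2.2⟩]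
      · rw [if_neg h, hTc u' v']
        by_cases h2' : 1 ≤ u' ∧ u' < r ∧ 1 ≤ v' ∧ v' ≤ K
        · rw [if_pos h2', if_pos ⟨h2'.1, by omega, h2'.2.2.1, h2'.2.2.2⟩]
        · rw [if_neg h2', if_neg (by
            rintro ⟨hx1, hx2, hx3, hx4⟩
            by_cases hur : u' = r
            · exact h ⟨hur, hx3, hx4⟩
            · exact h2' ⟨hx1, by omega, hx3, hx4⟩)]

lemma q2AL_char (g : Int → Int) (cost : Int → Int → Int) (n K : Int) (hK : 1 ≤ K)
    (hn : 0 ≤ n) :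
    ∀ u v, Q2AL g cost n K u v
      = if 1 ≤ u ∧ u ≤ n ∧ 1 ≤ v ∧ v ≤ K then Q2Lspec g cost n v.toNat u else pvInfty := by
  intro u v
  unfold Q2AL
  exact q2AL_rows g cost n K hK n.toNat 1 _ (le_refl _) (by omega) (by omega)
    (fun u' v' => by rw [if_neg (by rintro ⟨hx1, hx2, _⟩; omega)]) u v

-- B's recursion computes exactly the layers of the spec (with A's cost table, via q2cost_eq)
lemma q2BL_char (g : Int → Int) (n : Int) :
    ∀ (m : Nat) (j : Int), j.toNat ≤ m →
      ∀ i, Q2BL g n i j = Q2Lspec g (Q2ACost g n) n j.toNat i := by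
  intro m
  induction m with
  | zero =>
    intro j hm i
    have hj : j ≤ 0 := by omega
    rw [Q2BL, dif_pos (Or.inl hj), show j.toNat = 0 from by omega]
    rfl
  | succ m ih =>
    intro j hm i
    by_cases hj : j ≤ 0
    · rw [Q2BL, dif_pos (Or.inl hj), show j.toNat = 0 from by omega]
      rfl
    · obtain ⟨m2, hm2⟩ : ∃ m2, j.toNat = m2 + 1 := ⟨(j - 1).toNat, by omega⟩
      rw [hm2]
      by_cases hi : 1 ≤ i ∧ i ≤ n
      · rw [Q2BL, dif_neg (by rw [not_or]; exact ⟨by omega, by simpa using hi⟩)]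
        simp only [Q2Lspec]
        rw [if_pos hi, List.foldl_map]
        have hrange : ((m2 : Nat) : Int) = j - 1 := by omega
        rw [hrange]
        have hfun : (fun (best p : Int) =>
              min best (Q2Lspec g (Q2ACost g n) n m2 p + Q2ACost g n p i))
            = (fun best p => min best (Q2BL g n p (j - 1) + Q2BCost g n p i)) := by
          funext best p
          rw [ih (j - 1) (by omega) p, show (j - 1).toNat = m2 from by omega,
            q2cost_eq g n p i]
        rw [hfun]
        have hinit : (if m2 = 0 then Q2BS g i else pvInfty)
            = (if j = 1 then Q2BS g i else pvInfty) :=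
          if_congr ⟨fun h => by omega, fun h => by omega⟩ rfl rfl
        rw [hinit]
      · rw [Q2BL, dif_pos (Or.inr (by simpa using hi))]
        simp only [Q2Lspec]
        rw [if_neg hi]

-- the layer-K value is infty for every row when K exceeds n
lemma q2Lspec_infty (g : Int → Int) (cost : Int → Int → Int) (n K i : Int)
    (h2 : 2 ≤ K) (hi : i ≤ K - 1) :
    Q2Lspec g cost n K.toNat i = pvInfty := by
  obtain ⟨j', hj'⟩ : ∃ j', K.toNat = j' + 1 := ⟨(K - 1).toNat, by omega⟩
  rw [hj']
  simp only [Q2Lspec]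
  by_cases hg : 1 ≤ i ∧ i ≤ n
  · rw [if_pos hg, PySem.List.pyRange_one_eq_nil (by omega : i ≤ (j' : Int)), List.map_nil,
      List.foldl_nil, if_neg (by omega : ¬(j' = 0))]
  · rw [if_neg hg]

-- ===== VERDICT (by name: the statement is the Claim_ definition above) =====
set_option maxHeartbeats 1000000 in
theorem Q2_solution_spec : Claim_equal_Q2_solution := by
  intro n K x _ hpre
  unfold Spec_Q2_solution
  simp only [Q2_solution, Q2_solution_alt]
  by_cases hn0 : n ≤ 0
  · rw [if_pos (Or.inl hn0), PySem.List.pyRange_one_eq_nil (by omega), List.foldl_nil]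
  · have hK : 1 ≤ K := by
      rcases hpre with h | h
      · omega
      · exact h.1
    rw [q2AMin_funeq, q2_foldl_gt_min]
    by_cases hKn : K > n
    · rw [if_pos (Or.inr hKn)]
      refine q2_foldl_min_ge _ _ (fun y hy => ?_)
      obtain ⟨i, hi, rfl⟩ := List.mem_map.1 hy
      have ⟨hi1, hi2⟩ := PySem.List.mem_pyRange_one.1 hi
      rw [q2AL_char _ _ n K hK (by omega) i K, if_pos ⟨hi1, by omega, hK, le_refl _⟩,
        q2Lspec_infty _ _ n K i (by omega) (by omega)]
      exact le_add_of_nonneg_right (q2_suf_nonneg _ n i)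
    · rw [if_neg (by omega : ¬(n ≤ 0 ∨ K > n))]
      congr 1
      refine List.map_congr_left (fun i hi => ?_)
      have ⟨hi1, hi2⟩ := PySem.List.mem_pyRange_one.1 hi
      rw [q2AL_char _ _ n K hK (by omega) i K, if_pos ⟨hi1, by omega, hK, le_refl _⟩,
        q2BL_char _ n K.toNat K (le_refl _) i]
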